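-- pv_equiv track=rewrite | github.com/GerbenKoopman/LeanReinforcement | src/lean_rl/agents/transformer/parameter_generator.py | validate_term_syntax
-- ===== SOURCE A (Python) =====
-- from typing import Dict, Optional, Any, List, Union
--
-- def validate_term_syntax(term_tokens: List[str]) -> bool:
--     """Check if generated term has valid Lean syntax."""
--     # Basic syntax validation
--     if not term_tokens:
--         return False
--
--     # Check for balanced parentheses
--     paren_count = 0
--     for token in term_tokens:
--         if token == "(":
--             paren_count += 1
--         elif token == ")":
--             paren_count -= 1
--             if paren_count < 0:
--                 return False
--
--     return paren_count == 0
-- ===== SOURCE B (Python) =====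
-- from typing import List
--
--
-- def _scan(tokens: List[str], lo: int, hi: int):
--     """Divide and conquer over tokens[lo:hi]: returns the pair
--     (minimum intermediate paren depth, net depth change) of the segment.
--     The pair forms a monoid: (m1,s1)*(m2,s2) = (min(m1, s1+m2), s1+s2)."""
--     if hi - lo == 1:
--         t = tokens[lo]
--         v = 1 if t == "(" else -1 if t == ")" else 0
--         return (min(v, 0), v)
--     mid = (lo + hi) // 2
--     m1, s1 = _scan(tokens, lo, mid)
--     m2, s2 = _scan(tokens, mid, hi)
--     return (min(m1, s1 + m2), s1 + s2)
--
--
-- def validate_term_syntax(term_tokens: List[str]) -> bool: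
--     """Check if generated term has valid Lean syntax."""
--     if not term_tokens:
--         return False
--     m, s = _scan(term_tokens, 0, len(term_tokens))
--     return m >= 0 and s == 0
-- ===== Notes on version B (the rewrite author's own statement) =====
-- stated objective: alternative
-- what changed: Replaces the sequential counter loop with early exit by a divide-and-conquer monoid reduction over halves of the token list, combining (minimum intermediate depth, net depth change) pairs; valid iff the combined minimum is >= 0 and the net change is 0.
import Mathlib
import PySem

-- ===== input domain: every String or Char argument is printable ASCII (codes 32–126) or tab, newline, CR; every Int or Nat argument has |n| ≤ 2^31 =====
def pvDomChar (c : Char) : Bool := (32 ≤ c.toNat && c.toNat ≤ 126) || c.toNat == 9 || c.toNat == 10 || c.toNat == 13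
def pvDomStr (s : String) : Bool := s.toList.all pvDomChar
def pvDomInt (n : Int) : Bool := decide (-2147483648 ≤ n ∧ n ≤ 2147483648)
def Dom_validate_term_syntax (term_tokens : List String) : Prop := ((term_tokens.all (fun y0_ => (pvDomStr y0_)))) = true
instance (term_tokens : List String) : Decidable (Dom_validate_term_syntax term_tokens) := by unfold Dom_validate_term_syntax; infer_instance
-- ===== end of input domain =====

-- B replaces A's sequential early-exit counter loop by a divide-and-conquer
-- monoid reduction (objective: alternative algorithm of the same O(n) cost).

-- ===== PORT A =====
-- A's for-loop with early return, as structural recursion carrying paren_count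
def vtsGoA (paren_count : Int) : List String → Bool
  | [] => paren_count == 0
  | token :: rest =>
    if token == "(" then vtsGoA (paren_count + 1) rest
    else if token == ")" then
      (if paren_count - 1 < 0 then false else vtsGoA (paren_count - 1) rest)
    else vtsGoA paren_count rest

def validate_term_syntax (term_tokens : List String) : Bool :=
  if term_tokens = [] then false
  else vtsGoA 0 term_tokens

-- ===== PORT B =====
-- Source B's _scan(tokens, lo, hi); the index pair (lo, hi) is ported as the
-- sublist tokens[lo:hi], exact because the left half tokens[lo:mid] with
-- mid = (lo+hi)//2 has length (hi-lo)//2, i.e. is (take (length/2)) of the segment.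
def vtsScan : List String → Int × Int
  | [] => (0, 0)  -- unreachable: _scan is only called with hi - lo ≥ 1
  | [t] =>
    let v : Int := if t == "(" then 1 else if t == ")" then -1 else 0
    (min v 0, v)
  | a :: b :: rest =>
    let mid := (a :: b :: rest).length / 2
    let p1 := vtsScan ((a :: b :: rest).take mid)
    let p2 := vtsScan ((a :: b :: rest).drop mid)
    (min p1.1 (p1.2 + p2.1), p1.2 + p2.2)
termination_by l => l.length
decreasing_by
  · simp; omega
  · simp; omega

def validate_term_syntax_alt (term_tokens : List String) : Bool :=
  if term_tokens = [] then false
  else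
    let ms := vtsScan term_tokens
    decide (0 ≤ ms.1) && (ms.2 == 0)

-- ===== PRECONDITION & SPEC =====
def Spec_validate_term_syntax (term_tokens : List String) (out : Bool) : Prop := out = validate_term_syntax_alt term_tokens
instance (term_tokens : List String) (out : Bool) : Decidable (Spec_validate_term_syntax term_tokens out) := by unfold Spec_validate_term_syntax; infer_instance

-- ===== CLAIM (what is proved, stated in full; the proofs are below) =====
def Claim_equal_validate_term_syntax : Prop := ∀ (term_tokens : List String), Dom_validate_term_syntax term_tokens → Spec_validate_term_syntax term_tokens (validate_term_syntax term_tokens)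

-- ===== LEMMAS AND PROOFS =====
-- reference semantics: per-token depth change, net change, minimum prefix depth
def vtsV (t : String) : Int := if t == "(" then 1 else if t == ")" then -1 else 0

def vtsSum (l : List String) : Int := (l.map vtsV).sum

def vtsMin : List String → Int
  | [] => 0
  | t :: r => min 0 (vtsV t + vtsMin r)

theorem vtsMin_nonpos : ∀ l, vtsMin l ≤ 0
  | [] => le_refl 0
  | _ :: _ => min_le_left _ _

theorem vtsSum_append (l1 l2 : List String) :
    vtsSum (l1 ++ l2) = vtsSum l1 + vtsSum l2 := by
  simp [vtsSum]

theorem vtsMin_append : ∀ (l1 l2 : List String),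
    vtsMin (l1 ++ l2) = min (vtsMin l1) (vtsSum l1 + vtsMin l2)
  | [], l2 => by
    have := vtsMin_nonpos l2
    simp [vtsMin, vtsSum]; omega
  | t :: r, l2 => by
    have h := vtsMin_append r l2
    simp [vtsMin, vtsSum, List.map_cons, List.sum_cons] at *
    omega

theorem vtsScan_eq : ∀ (l : List String), l ≠ [] → vtsScan l = (vtsMin l, vtsSum l)
  | [], h => absurd rfl h
  | [t], _ => by
    simp [vtsScan, vtsMin, vtsSum, vtsV]
    omega
  | a :: b :: rest, _ => by
    rw [vtsScan]
    have hlen : (a :: b :: rest).length = rest.length + 2 := by simp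
    set l := a :: b :: rest with hl
    set mid := l.length / 2 with hmid
    have h1 : 1 ≤ mid := by omega
    have h2 : mid < l.length := by omega
    have htn : l.take mid ≠ [] := by
      intro h; have := congrArg List.length h; simp at this; omega
    have hdn : l.drop mid ≠ [] := by
      intro h; have := congrArg List.length h; simp at this; omega
    have e1 := vtsScan_eq (l.take mid) htn
    have e2 := vtsScan_eq (l.drop mid) hdn
    rw [e1, e2]
    have hsplit : l = l.take mid ++ l.drop mid := (List.take_append_drop mid l).symm
    conv_rhs => rw [hsplit]
    rw [vtsMin_append, vtsSum_append]
termination_by l => l.length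
decreasing_by
  · simp; omega
  · simp; omega

theorem vtsGoA_eq : ∀ (l : List String) (c : Int), 0 ≤ c →
    vtsGoA c l = decide (0 ≤ c + vtsMin l ∧ c + vtsSum l = 0)
  | [], c, _ => by
    rw [Bool.eq_iff_iff]
    simp [vtsGoA, vtsMin, vtsSum]
    omega
  | t :: r, c, hc => by
    have hmp := vtsMin_nonpos r
    by_cases h1 : t = "("
    · have ih := vtsGoA_eq r (c + 1) (by omega)
      rw [Bool.eq_iff_iff]
      simp [vtsGoA, vtsMin, vtsSum, vtsV, h1, ih]
      omega
    · by_cases h2 : t = ")"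
      · by_cases h3 : c - 1 < 0
        · rw [Bool.eq_iff_iff]
          simp [vtsGoA, vtsMin, vtsSum, vtsV, h2, h3]
          omega
        · have ih := vtsGoA_eq r (c - 1) (by omega)
          rw [Bool.eq_iff_iff]
          simp [vtsGoA, vtsMin, vtsSum, vtsV, h2, h3, ih]
          omega
      · have ih := vtsGoA_eq r c hc
        rw [Bool.eq_iff_iff]
        simp [vtsGoA, vtsMin, vtsSum, vtsV, h1, h2, ih]
        omega

-- ===== VERDICT (by name: the statement is the Claim_ definition above) =====
theorem validate_term_syntax_spec : Claim_equal_validate_term_syntax := by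
  intro ts _
  unfold Spec_validate_term_syntax validate_term_syntax validate_term_syntax_alt
  by_cases h : ts = []
  · simp [h]
  · rw [if_neg h, if_neg h, vtsScan_eq ts h, vtsGoA_eq ts 0 le_rfl, Bool.eq_iff_iff]
    simp
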